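-- pv_equiv track=rewrite | github.com/quadruplesec/University | FP/Practice Tests/ENP_M/exercise5_m.py | generate
-- ===== SOURCE A (Python) =====
-- def generate(word):
--     ret_list = []
--     '''
--     List of Rules:
--     1 - If string ends with "I", add "U" to end.
--     2 - Double the string after "M"
--     3 - Replace any "III" with "U"
--     4 - Remove any "UU"
--
--     PS: AWFUL AWFUL CODE. DOESN'T PASS HALF OF THE PRIVATE TESTS. IGNORE!
--     '''
--
--
--     #Rule 1: behaviour ok
--     if word.endswith("I"):
--         ret_list.append(word + "U")
--
--     #Rule 2: behaviour ok
--     for x, y in enumerate(word):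
--         if y == "M":
--             ret_list.append(word[0:x+1] + word[x+1:] + word[x+1:])
--
--     #Rule 3: janky implementation, seems to work ok
--     if "III" in word:
--         a = word.count("III")
--         c = word
--         while a > 0:
--             d = c.index("III")
--             ret_list.append(word[0:d] + "U" + word[d+3:])
--             c = word[0:d] + "XXX" + word[d+3:]
--             a += -1
--
--     #Rule 4: even jankier, seems to work ok
--     if "UU" in word:
--         a = word.count("UU")
--         c = word
--         while a > 0:
--             d = c.index("UU")
--             ret_list.append(word[0:d] +  word[d+2:])
--             c = word[0:d] + "XX" + word[d+2:]
--             a += -1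
--
--
--     return sorted(ret_list)
-- ===== SOURCE B (Python) =====
-- def generate(word):
--     variants = [word + "U"] if word.endswith("I") else []
--     skip3 = 0
--     skip2 = 0
--     for i, ch in enumerate(word):
--         if ch == "M":
--             variants.append(word[: i + 1] + 2 * word[i + 1 :])
--         if i >= skip3 and word[i : i + 3] == "III":
--             variants.append(word[:i] + "U" + word[i + 3 :])
--             skip3 = i + 3
--         if i >= skip2 and word[i : i + 2] == "UU":
--             variants.append(word[:i] + word[i + 2 :])
--             skip2 = i + 2
--     return sorted(variants)
-- ===== Notes on version B (the rewrite author's own statement) =====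
-- stated objective: alternative
-- what changed: A runs four staged passes (endswith, an enumerate pass for 'M', then for each of 'III'/'UU' a count-then-index loop that rebuilds a masked copy of the word per occurrence and re-searches it from the start); B is one single left-to-right pass over the characters with two skip accumulators that emits the rule-2, rule-3 and rule-4 variants at each index as it goes, never re-scanning or rebuilding the string; this also fixes A's masking loop, which re-masks the original word each time and so oscillates between the first two occurrences when there are three or more.
-- intended difference: On words containing at least 3 non-overlapping occurrences of 'III' (or of 'UU' not all inside one solid run of 'U's), A re-finds the first occurrence again after masking only the latest one, so it emits duplicate variants for the first two occurrences and never the later ones (e.g. for 'IIIIIIIII' A returns ['IIIIIIIIIU','IIIUIII','UIIIIII','UIIIIII']); B emits one variant per non-overlapping occurrence (['IIIIIIIIIU','IIIIIIU','IIIUIII','UIIIIII']), the intended rule-3/4 behaviour. — e.g. on generate("IIIIIIIII"): A returns ["IIIIIIIIIU", "IIIUIII", "UIIIIII", "UIIIIII"], B returns ["IIIIIIIIIU", "IIIIIIU", "IIIUIII", "UIIIIII"]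
import Mathlib
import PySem

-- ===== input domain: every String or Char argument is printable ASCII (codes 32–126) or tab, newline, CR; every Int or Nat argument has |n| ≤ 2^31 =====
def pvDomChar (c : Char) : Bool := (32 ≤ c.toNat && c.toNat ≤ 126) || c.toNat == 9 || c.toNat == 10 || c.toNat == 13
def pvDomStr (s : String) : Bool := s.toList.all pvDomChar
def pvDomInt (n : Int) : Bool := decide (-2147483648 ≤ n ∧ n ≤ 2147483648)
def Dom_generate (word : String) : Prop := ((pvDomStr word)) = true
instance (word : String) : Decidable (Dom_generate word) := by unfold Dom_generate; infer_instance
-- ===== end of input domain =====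

-- B replaces A's four staged passes (endswith; an enumerate pass for 'M'; for each of "III"/"UU" a
-- count-then-index loop rebuilding a masked copy of the word per occurrence) by ONE single left-to-right
-- pass with two skip accumulators that emits the rule-2/3/4 variants at each index as it goes
-- (alternative decomposition); on words with ≥ 3 non-overlapping occurrences of "III" or "UU" A's
-- masking loop is wrong (it oscillates between the first two occurrences) and B returns the intended
-- variants — see D_generate. Both ports work on word.toList and sort variant char-lists
-- (Python's str order = '<' on List Char).

-- ===== PORT A =====
-- A's `while a > 0:` loop for rules 3/4 (used twice, with sub/mask/mid = "III"/"XXX"/"U" and "UU"/"XX"/"").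
-- `c.index(sub)` is ported as PySem.Chars.find: on every state this loop reaches, sub occurs in c
-- (A's Python never raises), so find's -1 is never produced where Python returns.
def generateMaskLoop (w sub mask mid : List Char) : Nat → List Char → List (List Char) → List (List Char)
  | 0, _, acc => acc
  | a + 1, c, acc =>
    let d := PySem.Chars.find c sub
    let acc' := acc ++ [PySem.List.slice w (some 0) (some d) ++ mid ++
        PySem.List.slice w (some (d + (sub.length : Int))) none]
    let c' := PySem.List.slice w (some 0) (some d) ++ mask ++
        PySem.List.slice w (some (d + (sub.length : Int))) none
    generateMaskLoop w sub mask mid a c' acc'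

def generate (word : String) : List String :=
  let w := word.toList
  let ret0 : List (List Char) :=
    if PySem.Chars.endswith w ['I'] then [w ++ ['U']] else []
  let ret1 := (PySem.List.enumerate w 0).foldl (fun acc xy =>
    if xy.2 == 'M' then
      acc ++ [PySem.List.slice w (some 0) (some (xy.1 + 1)) ++
        PySem.List.slice w (some (xy.1 + 1)) none ++ PySem.List.slice w (some (xy.1 + 1)) none]
    else acc) ret0
  let ret2 :=
    if PySem.Chars.isIn ['I', 'I', 'I'] w then
      generateMaskLoop w ['I', 'I', 'I'] ['X', 'X', 'X'] ['U']
        (PySem.Chars.count w ['I', 'I', 'I']) w ret1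
    else ret1
  let ret3 :=
    if PySem.Chars.isIn ['U', 'U'] w then
      generateMaskLoop w ['U', 'U'] ['X', 'X'] []
        (PySem.Chars.count w ['U', 'U']) w ret2
    else ret2
  (PySem.List.sorted ret3 (fun x => x) false).map String.ofList

-- ===== PORT B =====
-- the body of B's single `for i, ch in enumerate(word):` loop; state = (variants, skip3, skip2)
def pvStepB (w : List Char) (st : List (List Char) × Int × Int) (p : Int × Char) :
    List (List Char) × Int × Int :=
  let acc1 := if p.2 == 'M' then
      st.1 ++ [PySem.List.slice w none (some (p.1 + 1)) ++
        PySem.List.pyRepeat (PySem.List.slice w (some (p.1 + 1)) none) 2]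
    else st.1
  let st3 : List (List Char) × Int :=
    if st.2.1 ≤ p.1 ∧ PySem.List.slice w (some p.1) (some (p.1 + 3)) = ['I', 'I', 'I'] then
      (acc1 ++ [PySem.List.slice w none (some p.1) ++ ['U'] ++
        PySem.List.slice w (some (p.1 + 3)) none], p.1 + 3)
    else (acc1, st.2.1)
  let st2 : List (List Char) × Int :=
    if st.2.2 ≤ p.1 ∧ PySem.List.slice w (some p.1) (some (p.1 + 2)) = ['U', 'U'] then
      (st3.1 ++ [PySem.List.slice w none (some p.1) ++
        PySem.List.slice w (some (p.1 + 2)) none], p.1 + 2)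
    else (st3.1, st.2.2)
  (st2.1, st3.2, st2.2)

def generate_alt (word : String) : List String :=
  let w := word.toList
  let v0 : List (List Char) :=
    if PySem.Chars.endswith w ['I'] then [w ++ ['U']] else []
  let st := (PySem.List.enumerate w 0).foldl (pvStepB w) (v0, 0, 0)
  (PySem.List.sorted st.1 (fun x => x) false).map String.ofList

-- ===== PRECONDITION & SPEC =====
-- On words with ≥ 3 non-overlapping occurrences of "III" (or of "UU", except when all the "UU"s lie
-- in one solid run of 'U's, where every deletion gives the same string) A re-finds the first occurrence
-- again after masking only the latest one, so it emits duplicate variants for the first two occurrences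
-- and never the later ones; B emits one variant per occurrence, the intended behaviour of rules 3/4.
def D_generate (word : String) : Prop :=
  3 ≤ PySem.Str.count word "III" ∨
    (3 ≤ PySem.Str.count word "UU" ∧
      ¬ ((word.toList.drop (PySem.Str.find word "UU").toNat).take (2 * PySem.Str.count word "UU")
          = List.replicate (2 * PySem.Str.count word "UU") 'U'))
instance (word : String) : Decidable (D_generate word) := by unfold D_generate; infer_instance

def Spec_generate (word : String) (out : List String) : Prop :=
  ¬ D_generate word → out = generate_alt word
instance (word : String) (out : List String) : Decidable (Spec_generate word out) := by
  unfold Spec_generate; infer_instance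

def pvDiffWitness_generate : String := "IIIIIIIII"
def pvDiffWitnessOut_generate : (List String) × (List String) :=
  (["IIIIIIIIIU", "IIIUIII", "UIIIIII", "UIIIIII"],
   ["IIIIIIIIIU", "IIIIIIU", "IIIUIII", "UIIIIII"])

-- ===== CLAIM (what is proved, stated in full; the proofs are below) =====
def Claim_unchanged_generate : Prop :=
  ∀ (word : String), Dom_generate word → Spec_generate word (generate word)
def Claim_changed_generate : Prop :=
  Dom_generate (pvDiffWitness_generate) ∧ D_generate (pvDiffWitness_generate) ∧
  generate (pvDiffWitness_generate) = pvDiffWitnessOut_generate.1 ∧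
  generate_alt (pvDiffWitness_generate) = pvDiffWitnessOut_generate.2 ∧
  pvDiffWitnessOut_generate.1 ≠ pvDiffWitnessOut_generate.2
def Claim_exact_generate : Prop :=
  ∀ (word : String), Dom_generate word → D_generate word →
    generate word ≠ generate_alt word

-- ===== LEMMAS AND PROOFS =====

-- greedy non-overlapping occurrence starts of sub in s (the positions Python's str.count counts)
def pvHits (sub : List Char) : List Char → List Nat
  | [] => []
  | c :: t =>
    if h : sub.isPrefixOf (c :: t) = true ∧ sub ≠ [] then
      0 :: (pvHits sub ((c :: t).drop sub.length)).map (· + sub.length)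
    else (pvHits sub t).map (· + 1)
termination_by l => l.length
decreasing_by
  · simp only [List.length_drop, List.length_cons]
    have : sub.length ≠ 0 := fun hn => h.2 (List.eq_nil_of_length_eq_zero hn)
    omega
  · simp

theorem pvHits_nil (sub : List Char) : pvHits sub [] = [] := by rw [pvHits]

theorem pvHits_cons (sub : List Char) (c : Char) (t : List Char) :
    pvHits sub (c :: t) =
      if sub.isPrefixOf (c :: t) = true ∧ sub ≠ [] then
        0 :: (pvHits sub ((c :: t).drop sub.length)).map (· + sub.length)
      else (pvHits sub t).map (· + 1) := by
  rw [pvHits]; split_ifs <;> rfl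


theorem pv_count_go (sub : List Char) (hs : sub ≠ []) (hsl : 1 ≤ sub.length) :
    ∀ (fuel : Nat) (s : List Char) (acc : Nat), s.length ≤ fuel →
      PySem.Chars.count.go sub fuel s acc = acc + (pvHits sub s).length := by
  intro fuel
  induction fuel with
  | zero =>
    intro s acc h
    have hnil : s = [] := List.eq_nil_of_length_eq_zero (Nat.le_zero.mp h)
    subst hnil
    have e : PySem.Chars.count.go sub 0 [] acc = acc := rfl
    rw [e, pvHits_nil]
    simp
  | succ n ih =>
    intro s acc h
    cases s with
    | nil =>
      have e : PySem.Chars.count.go sub (n + 1) [] acc = acc := rfl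
      rw [e, pvHits_nil]
      simp
    | cons c t =>
      have hstep : PySem.Chars.count.go sub (n + 1) (c :: t) acc =
          if sub.isPrefixOf (c :: t) then
            PySem.Chars.count.go sub n ((c :: t).drop sub.length) (acc + 1)
          else PySem.Chars.count.go sub n t acc := rfl
      rw [hstep, pvHits_cons]
      by_cases hp : sub.isPrefixOf (c :: t) = true
      · rw [if_pos hp, if_pos ⟨hp, hs⟩,
          ih ((c :: t).drop sub.length) (acc + 1) (by simp at h ⊢; omega)]
        simp only [List.length_cons, List.length_map]
        omega
      · rw [if_neg hp, if_neg (fun hcc => hp hcc.1), ih t acc (by simp at h; omega)]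
        simp only [List.length_map]

theorem pvHits_count (sub : List Char) (hs : sub ≠ []) (s : List Char) :
    PySem.Chars.count s sub = (pvHits sub s).length := by
  have hsl : 1 ≤ sub.length := by
    cases sub with
    | nil => exact absurd rfl hs
    | cons a b => simp
  have hne : sub.isEmpty = false := by
    cases sub with
    | nil => exact absurd rfl hs
    | cons a b => rfl
  have e : PySem.Chars.count s sub = PySem.Chars.count.go sub s.length s 0 := by
    simp [PySem.Chars.count, hne]
  rw [e, pv_count_go sub hs hsl s.length s 0 le_rfl]
  omega

theorem pv_find_go (sub : List Char) (hs : sub ≠ []) :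
    ∀ (s : List Char) (k : Nat), PySem.Chars.find.go sub s k =
      match pvHits sub s with
      | [] => -1
      | p :: _ => ((k + p : Nat) : Int) := by
  intro s
  induction s with
  | nil =>
    intro k
    have hne : sub.isEmpty = false := by
      cases sub with
      | nil => exact absurd rfl hs
      | cons a b => rfl
    have hstep : PySem.Chars.find.go sub [] k = if sub.isEmpty then (k : Int) else -1 := rfl
    rw [hstep, pvHits_nil, hne]
    rfl
  | cons c t ih =>
    intro k
    have hstep : PySem.Chars.find.go sub (c :: t) k =
        if sub.isPrefixOf (c :: t) then (k : Int) else PySem.Chars.find.go sub t (k + 1) := rfl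
    rw [hstep, pvHits_cons]
    by_cases hp : sub.isPrefixOf (c :: t) = true
    · rw [if_pos hp, if_pos ⟨hp, hs⟩]
      simp
    · rw [if_neg hp, if_neg (fun hcc => hp hcc.1), ih (k + 1)]
      cases hht : pvHits sub t with
      | nil => rfl
      | cons q rest =>
        show ((k + 1 + q : Nat) : Int) = ((k + (q + 1) : Nat) : Int)
        congr 1
        omega

theorem pvHits_find_nil (sub : List Char) (hs : sub ≠ []) (s : List Char)
    (h : pvHits sub s = []) : PySem.Chars.find s sub = -1 := by
  have e : PySem.Chars.find s sub = PySem.Chars.find.go sub s 0 := rfl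
  rw [e, pv_find_go sub hs s 0, h]

theorem pvHits_find_cons (sub : List Char) (hs : sub ≠ []) (s : List Char) (p : Nat)
    (ps : List Nat) (h : pvHits sub s = p :: ps) : PySem.Chars.find s sub = (p : Int) := by
  have e : PySem.Chars.find s sub = PySem.Chars.find.go sub s 0 := rfl
  rw [e, pv_find_go sub hs s 0, h]
  show ((0 + p : Nat) : Int) = (p : Int)
  congr 1
  omega

theorem pvHits_spec (sub : List Char) (s : List Char) (p : Nat) (ps : List Nat)
    (h : pvHits sub s = p :: ps) :
    sub.isPrefixOf (s.drop p) = true ∧ p + sub.length ≤ s.length ∧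
      ps = (pvHits sub (s.drop (p + sub.length))).map (· + (p + sub.length)) := by
  induction s generalizing p ps with
  | nil => rw [pvHits_nil] at h; exact absurd h (by simp)
  | cons c t ih =>
    rw [pvHits_cons] at h
    split_ifs at h with hc
    · obtain ⟨hp, hps⟩ := List.cons.inj h
      subst hp
      have hlen := List.IsPrefix.length_le ((List.isPrefixOf_iff_prefix).mp hc.1)
      refine ⟨by simpa using hc.1, by simpa using hlen, ?_⟩
      rw [← hps]
      simp
    · cases hht : pvHits sub t with
      | nil => rw [hht] at h; exact absurd h (by simp)
      | cons p' ps' =>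
        rw [hht] at h
        simp only [List.map_cons] at h
        obtain ⟨hp, hps⟩ := List.cons.inj h
        obtain ⟨h1, h2, h3⟩ := ih p' ps' hht
        subst hp
        refine ⟨by simpa [List.drop_succ_cons] using h1, by simp only [List.length_cons]; omega, ?_⟩
        rw [← hps, h3]
        have hd : (c :: t).drop (p' + 1 + sub.length) = t.drop (p' + sub.length) := by
          rw [show p' + 1 + sub.length = (p' + sub.length) + 1 by omega]
          simp [List.drop_succ_cons]
        rw [hd, List.map_map]
        apply List.map_congr_left
        intro x _
        simp
        omega

theorem pvHits_min (sub : List Char) (hs : sub ≠ []) (s : List Char) (p : Nat) (ps : List Nat)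
    (h : pvHits sub s = p :: ps) :
    ∀ i < p, ¬ sub.isPrefixOf (s.drop i) = true := by
  induction s generalizing p ps with
  | nil => rw [pvHits_nil] at h; exact absurd h (by simp)
  | cons c t ih =>
    rw [pvHits_cons] at h
    split_ifs at h with hc
    · obtain ⟨hp, -⟩ := List.cons.inj h
      subst hp
      intro i hi
      exact absurd hi (Nat.not_lt_zero i)
    · cases hht : pvHits sub t with
      | nil => rw [hht] at h; exact absurd h (by simp)
      | cons p' ps' =>
        rw [hht] at h
        simp only [List.map_cons] at h
        obtain ⟨hp, -⟩ := List.cons.inj h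
        subst hp
        intro i hi
        cases i with
        | zero =>
          simp only [List.drop_zero]
          intro hpre
          exact hc ⟨hpre, hs⟩
        | succ j =>
          simp only [List.drop_succ_cons]
          exact ih p' ps' hht j (by omega)

theorem pvHits_shift (sub : List Char) (b r : List Char)
    (h : ∀ i < b.length, ¬ sub.isPrefixOf ((b ++ r).drop i) = true) :
    pvHits sub (b ++ r) = (pvHits sub r).map (· + b.length) := by
  induction b with
  | nil =>
    simp only [List.nil_append, List.length_nil]
    have e : ((· + 0) : Nat → Nat) = id := funext (by simp)
    rw [e, List.map_id]
  | cons c b ih =>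
    have h0 : ¬ sub.isPrefixOf (c :: (b ++ r)) = true := by
      have := h 0 (by simp)
      simpa using this
    rw [List.cons_append, pvHits_cons, if_neg (fun hcc => h0 hcc.1)]
    rw [ih (by
      intro i hi
      have := h (i + 1) (by simp; omega)
      simpa using this)]
    rw [List.map_map]
    simp only [List.length_cons]
    apply List.map_congr_left
    intro x _
    simp
    omega

theorem pvMaskGet (s : List Char) (p len : Nat) (hplen : p + len ≤ s.length) (j : Nat)
    (hj : j < s.length) :
    ((s.take p ++ List.replicate len 'X' ++ s.drop (p + len))[j]'(by
        simp [List.length_take, List.length_replicate, List.length_drop]; omega)) =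
      if j < p then s[j] else if j < p + len then 'X' else s[j] := by
  have hTp : (List.take p s).length = p := by simp [List.length_take]; omega
  have hTR : (List.take p s ++ List.replicate len 'X').length = p + len := by simp [hTp]
  rcases Nat.lt_or_ge j p with h1 | h1
  · rw [if_pos h1, List.getElem_append_left (by rw [hTR]; omega),
      List.getElem_append_left (by rw [hTp]; omega)]
    simp [List.getElem_take]
  · rcases Nat.lt_or_ge j (p + len) with h2 | h2
    · rw [if_neg (by omega), if_pos h2, List.getElem_append_left (by rw [hTR]; omega),
        List.getElem_append_right (by rw [hTp]; omega)]
      simp [List.getElem_replicate]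
    · rw [if_neg (by omega), if_neg (by omega),
        List.getElem_append_right (by rw [hTR]; omega), List.getElem_drop]
      have hidx : p + len + (j - (min p s.length + len)) = j := by omega
      simp [hidx]

theorem pvHits_mask (sub : List Char) (hs : sub ≠ []) (hX : 'X' ∉ sub) (s : List Char)
    (p : Nat) (ps : List Nat) (h : pvHits sub s = p :: ps) :
    pvHits sub (s.take p ++ List.replicate sub.length 'X' ++ s.drop (p + sub.length)) = ps := by
  obtain ⟨hpre, hplen, hps⟩ := pvHits_spec sub s p ps h
  have hsl : 1 ≤ sub.length := by
    cases sub with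
    | nil => exact absurd rfl hs
    | cons a b => simp
  have hMlen : (s.take p ++ List.replicate sub.length 'X' ++ s.drop (p + sub.length)).length
      = s.length := by
    simp [List.length_take, List.length_replicate, List.length_drop]; omega
  have hb : (s.take p ++ List.replicate sub.length 'X').length = p + sub.length := by
    simp [List.length_take]; omega
  have key : ∀ i < p + sub.length,
      ¬ sub.isPrefixOf ((s.take p ++ List.replicate sub.length 'X'
        ++ s.drop (p + sub.length)).drop i) = true := by
    intro i hi hpre'
    have hpfx : sub <+: (s.take p ++ List.replicate sub.length 'X'
        ++ s.drop (p + sub.length)).drop i := (List.isPrefixOf_iff_prefix).mp hpre'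
    have hilen : i + sub.length ≤ s.length := by
      have := List.IsPrefix.length_le hpfx
      simp only [List.length_drop, hMlen] at this
      omega
    have hget : ∀ (j : Nat) (hjs : j < sub.length),
        ((s.take p ++ List.replicate sub.length 'X' ++ s.drop (p + sub.length))[i + j]'(by
          rw [hMlen]; omega)) = sub[j] := by
      intro j hjs
      rw [← List.getElem_drop]
      exact (List.IsPrefix.getElem hpfx hjs).symm
    rcases Nat.lt_or_ge (i + sub.length) (p + 1) with hc1 | hc1
    · -- the occurrence lies inside the unmasked front: contradicts minimality of p
      have hipre : sub.isPrefixOf (s.drop i) = true := by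
        rw [List.isPrefixOf_iff_prefix]
        have heq : sub = (s.drop i).take sub.length := by
          apply List.ext_getElem
          · simp [List.length_take, List.length_drop]; omega
          · intro j hj1 hj2
            rw [List.getElem_take, List.getElem_drop, ← hget j hj1,
              pvMaskGet s p sub.length hplen (i + j) (by omega), if_pos (by omega)]
        rw [heq]
        exact List.take_prefix _ _
      exact pvHits_min sub hs s p ps h i (by omega) hipre
    · -- some position of the occurrence falls on an 'X' of the mask
      have hxj : ∃ j, ∃ (hjx : j < sub.length), sub[j]'hjx = 'X' := by
        rcases Nat.lt_or_ge i p with hip | hip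
        · refine ⟨p - i, by omega, ?_⟩
          rw [← hget (p - i) (by omega),
            pvMaskGet s p sub.length hplen (i + (p - i)) (by omega),
            if_neg (by omega), if_pos (by omega)]
        · refine ⟨0, by omega, ?_⟩
          rw [← hget 0 (by omega),
            pvMaskGet s p sub.length hplen (i + 0) (by omega),
            if_neg (by omega), if_pos (by omega)]
      obtain ⟨j, hj1, hj2⟩ := hxj
      exact hX (hj2 ▸ List.getElem_mem hj1)
  rw [pvHits_shift sub _ _ (by intro i hi; exact key i (by rw [hb] at hi; omega))]
  rw [hb, hps]

-- the common variant value: word[:p] + mid + word[p+len:]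
def pvV (w sub mid : List Char) (p : Nat) : List Char :=
  w.take p ++ mid ++ w.drop (p + sub.length)

theorem pvElemA (w sub mid : List Char) (p : Nat) :
    PySem.List.slice w (some (0 : Int)) (some ((p : Nat) : Int)) ++ mid ++
      PySem.List.slice w (some (((p : Nat) : Int) + (sub.length : Int))) none
      = pvV w sub mid p := by
  rw [show ((p : Int) + (sub.length : Int)) = ((p + sub.length : Nat) : Int) by push_cast; ring]
  simp only [PySem.List.slice_zero_start, PySem.List.slice_to_natCast,
    PySem.List.slice_from_natCast, pvV]

theorem pvElemB (w sub mid : List Char) (p : Nat) :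
    PySem.List.slice w none (some ((p : Nat) : Int)) ++ mid ++
      PySem.List.slice w (some (((p + sub.length : Nat) : Int))) none
      = pvV w sub mid p := by
  simp only [PySem.List.slice_to_natCast, PySem.List.slice_from_natCast, pvV]

theorem pvMaskC (w sub mask : List Char) (p : Nat)
    (hmask : mask = List.replicate sub.length 'X') :
    PySem.List.slice w (some (0 : Int)) (some ((p : Nat) : Int)) ++ mask ++
      PySem.List.slice w (some (((p : Nat) : Int) + (sub.length : Int))) none
      = w.take p ++ List.replicate sub.length 'X' ++ w.drop (p + sub.length) := by
  rw [hmask, show ((p : Int) + (sub.length : Int)) = ((p + sub.length : Nat) : Int)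
    by push_cast; ring]
  simp only [PySem.List.slice_zero_start, PySem.List.slice_to_natCast,
    PySem.List.slice_from_natCast]

theorem pvMaskZero (w sub mask mid : List Char) (c : List Char) (acc : List (List Char)) :
    generateMaskLoop w sub mask mid 0 c acc = acc := rfl

theorem pvMaskSucc (w sub mask mid : List Char) (a : Nat) (c : List Char)
    (acc : List (List Char)) :
    generateMaskLoop w sub mask mid (a + 1) c acc =
      generateMaskLoop w sub mask mid a
        (PySem.List.slice w (some 0) (some (PySem.Chars.find c sub)) ++ mask ++
          PySem.List.slice w (some (PySem.Chars.find c sub + (sub.length : Int))) none)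
        (acc ++ [PySem.List.slice w (some 0) (some (PySem.Chars.find c sub)) ++ mid ++
          PySem.List.slice w (some (PySem.Chars.find c sub + (sub.length : Int))) none]) := rfl

-- index rewriting helper for getElem
theorem pvGetIdx (l : List Char) (i i' : Nat) (h : i = i') (hi : i < l.length) :
    l[i] = l[i']'(h ▸ hi) := by subst h; rfl

theorem pvPrefixOfPointwise (sub L : List Char) (i : Nat) (hlen : i + sub.length ≤ L.length)
    (h : ∀ j (hj : j < sub.length) (hjL : i + j < L.length), L[i + j] = sub[j]) :
    sub.isPrefixOf (L.drop i) = true := by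
  rw [List.isPrefixOf_iff_prefix]
  have heq : sub = (L.drop i).take sub.length := by
    apply List.ext_getElem
    · simp [List.length_take, List.length_drop]; omega
    · intro j hj1 hj2
      rw [List.getElem_take, List.getElem_drop]
      exact (h j hj1 (by omega)).symm
  rw [heq]
  exact List.take_prefix _ _

theorem pvPrefixGet (sub s : List Char) (q : Nat) (h : sub.isPrefixOf (s.drop q) = true)
    (hqs : q + sub.length ≤ s.length) (j : Nat) (hj : j < sub.length) :
    s[q + j]'(by omega) = sub[j] := by
  have hpfx : sub <+: s.drop q := (List.isPrefixOf_iff_prefix).mp h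
  have h1 : (s.drop q)[j]'(by simp [List.length_drop]; omega) = sub[j] :=
    (List.IsPrefix.getElem hpfx hj).symm
  rw [← List.getElem_drop]
  exact h1

theorem pvHits_first (sub : List Char) (hs : sub ≠ []) :
    ∀ (l : List Char) (p : Nat), sub.isPrefixOf (l.drop p) = true →
      (∀ i < p, ¬ sub.isPrefixOf (l.drop i) = true) → ∃ t, pvHits sub l = p :: t := by
  intro l
  induction l with
  | nil =>
    intro p hpre _
    exfalso
    have hpfx : sub <+: (([] : List Char).drop p) := (List.isPrefixOf_iff_prefix).mp hpre
    have := List.IsPrefix.length_le hpfx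
    simp at this
    exact hs this
  | cons c t ih =>
    intro p hpre hmin
    cases p with
    | zero =>
      rw [pvHits_cons, if_pos ⟨by simpa using hpre, hs⟩]
      exact ⟨_, rfl⟩
    | succ p' =>
      have h0 : ¬ sub.isPrefixOf (c :: t) = true := by simpa using hmin 0 (Nat.succ_pos p')
      rw [pvHits_cons, if_neg (fun hc => h0 hc.1)]
      obtain ⟨t', ht'⟩ := ih p' (by simpa [List.drop_succ_cons] using hpre) (fun i hi => by
        have := hmin (i + 1) (by omega)
        simpa [List.drop_succ_cons] using this)
      rw [ht']
      exact ⟨t'.map (· + 1), by simp⟩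

theorem pvHits_all (sub : List Char) (hs : sub ≠ []) : ∀ (n : Nat) (s : List Char), s.length = n →
    ∀ q ∈ pvHits sub s, sub.isPrefixOf (s.drop q) = true ∧ q + sub.length ≤ s.length := by
  have hsl : 1 ≤ sub.length := by
    cases sub with
    | nil => exact absurd rfl hs
    | cons a b => simp
  intro n
  induction n using Nat.strong_induction_on with
  | _ n ih =>
    intro s hn q hq
    cases hh : pvHits sub s with
    | nil => rw [hh] at hq; simp at hq
    | cons p ps =>
      rw [hh] at hq
      obtain ⟨h1, h2, h3⟩ := pvHits_spec sub s p ps hh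
      rcases List.mem_cons.mp hq with rfl | hq'
      · exact ⟨h1, h2⟩
      · rw [h3] at hq'
        obtain ⟨x, hx, rfl⟩ := List.mem_map.mp hq'
        have hrec := ih (s.drop (p + sub.length)).length
          (by simp only [List.length_drop]; omega) _ rfl x hx
        constructor
        · have hd : s.drop (x + (p + sub.length)) = (s.drop (p + sub.length)).drop x := by
            rw [List.drop_drop]; congr 1; omega
          rw [hd]
          exact hrec.1
        · have := hrec.2
          simp only [List.length_drop] at this
          omega

theorem pvHits_chain (sub s : List Char) (q : Nat) (t : List Nat)
    (h : pvHits sub s = q :: t) : ∀ r ∈ t, q + sub.length ≤ r := by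
  obtain ⟨-, -, h3⟩ := pvHits_spec sub s q t h
  intro r hr
  rw [h3] at hr
  obtain ⟨x, -, rfl⟩ := List.mem_map.mp hr
  omega

def pvAlt {α : Type} (x y : α) : Nat → List α
  | 0 => []
  | n + 1 => x :: pvAlt y x n

theorem length_pvAlt {α : Type} (x y : α) : ∀ n, (pvAlt x y n).length = n := by
  intro n
  induction n generalizing x y with
  | zero => rfl
  | succ n ih => simp [pvAlt, ih]

theorem mem_pvAlt {α : Type} (x y z : α) : ∀ n, z ∈ pvAlt x y n → z = x ∨ z = y := by
  intro n
  induction n generalizing x y with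
  | zero => intro h; simp [pvAlt] at h
  | succ n ih =>
    intro h
    simp only [pvAlt] at h
    rcases List.mem_cons.mp h with rfl | h2
    · exact Or.inl rfl
    · rcases ih y x h2 with h3 | h3
      · exact Or.inr h3
      · exact Or.inl h3

def pvAListOf : List Nat → List Nat
  | [] => []
  | [p] => [p]
  | p :: q :: rest => pvAlt p q (rest.length + 2)

theorem length_pvAListOf (l : List Nat) : (pvAListOf l).length = l.length := by
  match l with
  | [] => rfl
  | [p] => rfl
  | p :: q :: rest => simp [pvAListOf, length_pvAlt]

theorem mem_pvAListOf (l : List Nat) (x : Nat) (h : x ∈ pvAListOf l) : x ∈ l := by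
  match l with
  | [] => simpa [pvAListOf] using h
  | [p] => simpa [pvAListOf] using h
  | p :: q :: rest =>
    rcases mem_pvAlt p q x _ (by simpa [pvAListOf] using h) with rfl | rfl <;> simp

theorem pvAListOf_short (l : List Nat) (h : l.length ≤ 2) : pvAListOf l = l := by
  match l with
  | [] => rfl
  | [p] => rfl
  | [p, q] => rfl
  | p :: q :: r :: rest => simp at h

theorem pvMaskMidFind (sub : List Char) (hs : sub ≠ []) (w : List Char)
    (p1 p2 : Nat) (rest : List Nat) (hh : pvHits sub w = p1 :: p2 :: rest) :
    ∃ t2, pvHits sub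
      (w.take p2 ++ List.replicate sub.length 'X' ++ w.drop (p2 + sub.length)) = p1 :: t2 := by
  obtain ⟨hpre1, hplen1, -⟩ := pvHits_spec sub w p1 (p2 :: rest) hh
  obtain ⟨hpre2, hplen2⟩ := pvHits_all sub hs w.length w rfl p2 (by rw [hh]; simp)
  have hp12 : p1 + sub.length ≤ p2 := pvHits_chain sub w p1 (p2 :: rest) hh p2 (by simp)
  have hMlen : (w.take p2 ++ List.replicate sub.length 'X' ++ w.drop (p2 + sub.length)).length
      = w.length := by
    simp [List.length_take, List.length_replicate, List.length_drop]; omega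
  apply pvHits_first sub hs
  · refine pvPrefixOfPointwise sub _ p1 (by rw [hMlen]; omega) ?_
    intro j hj hjL
    rw [pvMaskGet w p2 sub.length hplen2 (p1 + j) (by omega), if_pos (by omega)]
    exact pvPrefixGet sub w p1 hpre1 hplen1 j hj
  · intro i hi hpre'
    have hiw : sub.isPrefixOf (w.drop i) = true := by
      refine pvPrefixOfPointwise sub w i (by omega) ?_
      intro j hj hjL
      have hget := pvPrefixGet sub _ i hpre' (by rw [hMlen]; omega) j hj
      rw [pvMaskGet w p2 sub.length hplen2 (i + j) (by omega), if_pos (by omega)] at hget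
      exact hget
    exact pvHits_min sub hs w p1 (p2 :: rest) hh i hi hiw

theorem pvABlockG (w sub mask mid : List Char) (acc : List (List Char)) (hs : sub ≠ [])
    (hX : 'X' ∉ sub) (hmask : mask = List.replicate sub.length 'X') :
    (if PySem.Chars.isIn sub w then
        generateMaskLoop w sub mask mid (PySem.Chars.count w sub) w acc
      else acc) = acc ++ (pvAListOf (pvHits sub w)).map (pvV w sub mid) := by
  cases hh : pvHits sub w with
  | nil =>
    have hfind := pvHits_find_nil sub hs w hh
    have hin : PySem.Chars.isIn sub w = false := by
      simp [PySem.Chars.isIn, hfind]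
    rw [if_neg (by simp [hin])]
    simp [pvAListOf]
  | cons p1 ps =>
    have hfind := pvHits_find_cons sub hs w p1 ps hh
    rw [if_pos (by simp [PySem.Chars.isIn, hfind])]
    cases ps with
    | nil =>
      have hc1 : PySem.Chars.count w sub = 0 + 1 := by
        rw [pvHits_count sub hs w, hh]
        simp
      rw [hc1, pvMaskSucc, pvMaskZero, hfind, pvElemA]
      simp [pvAListOf]
    | cons p2 rest =>
      have hmk1 : pvHits sub (w.take p1 ++ List.replicate sub.length 'X'
          ++ w.drop (p1 + sub.length)) = p2 :: rest := pvHits_mask sub hs hX w p1 (p2 :: rest) hh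
      have hfindM1 := pvHits_find_cons sub hs _ p2 rest hmk1
      obtain ⟨t2, hmk2⟩ := pvMaskMidFind sub hs w p1 p2 rest hh
      have hfindM2 := pvHits_find_cons sub hs _ p1 t2 hmk2
      have s12 : ∀ (a : Nat) (acc' : List (List Char)),
          generateMaskLoop w sub mask mid (a + 1)
              (w.take p1 ++ List.replicate sub.length 'X' ++ w.drop (p1 + sub.length)) acc'
            = generateMaskLoop w sub mask mid a
              (w.take p2 ++ List.replicate sub.length 'X' ++ w.drop (p2 + sub.length))
              (acc' ++ [pvV w sub mid p2]) := by
        intro a acc'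
        rw [pvMaskSucc, hfindM1, pvMaskC w sub mask p2 hmask, pvElemA]
      have s21 : ∀ (a : Nat) (acc' : List (List Char)),
          generateMaskLoop w sub mask mid (a + 1)
              (w.take p2 ++ List.replicate sub.length 'X' ++ w.drop (p2 + sub.length)) acc'
            = generateMaskLoop w sub mask mid a
              (w.take p1 ++ List.replicate sub.length 'X' ++ w.drop (p1 + sub.length))
              (acc' ++ [pvV w sub mid p1]) := by
        intro a acc'
        rw [pvMaskSucc, hfindM2, pvMaskC w sub mask p1 hmask, pvElemA]
      have altL : ∀ (a : Nat), ∀ (acc' : List (List Char)),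
          (generateMaskLoop w sub mask mid a
              (w.take p1 ++ List.replicate sub.length 'X' ++ w.drop (p1 + sub.length)) acc'
            = acc' ++ (pvAlt p2 p1 a).map (pvV w sub mid))
          ∧ (generateMaskLoop w sub mask mid a
              (w.take p2 ++ List.replicate sub.length 'X' ++ w.drop (p2 + sub.length)) acc'
            = acc' ++ (pvAlt p1 p2 a).map (pvV w sub mid)) := by
        intro a
        induction a with
        | zero => intro acc'; constructor <;> simp [pvMaskZero, pvAlt]
        | succ a ih =>
          intro acc'
          constructor
          · rw [s12 a acc', (ih _).2]
            simp [pvAlt]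
          · rw [s21 a acc', (ih _).1]
            simp [pvAlt]
      have hcnt : PySem.Chars.count w sub = (rest.length + 1) + 1 := by
        rw [pvHits_count sub hs w, hh]
        simp
      rw [hcnt, pvMaskSucc, hfind, pvMaskC w sub mask p1 hmask, pvElemA,
        (altL (rest.length + 1) _).1]
      simp [pvAListOf, pvAlt]

-- the common list of rule-1/rule-2 variants (as produced by both programs, before rules 3/4)
def pvF (w : List Char) : List (List Char) :=
  (if PySem.Chars.endswith w ['I'] then [w ++ ['U']] else []) ++
    ((PySem.List.enumerate w 0).filter (fun p => p.2 == 'M')).map (fun p =>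
      PySem.List.slice w none (some (p.1 + 1)) ++
        PySem.List.pyRepeat (PySem.List.slice w (some (p.1 + 1)) none) 2)

theorem pvFront (w : List Char) (r0 : List (List Char)) :
    (PySem.List.enumerate w 0).foldl (fun acc xy =>
      if xy.2 == 'M' then
        acc ++ [PySem.List.slice w (some 0) (some (xy.1 + 1)) ++
          PySem.List.slice w (some (xy.1 + 1)) none ++ PySem.List.slice w (some (xy.1 + 1)) none]
      else acc) r0 =
    r0 ++ ((PySem.List.enumerate w 0).filter (fun p => p.2 == 'M')).map (fun p =>
      PySem.List.slice w none (some (p.1 + 1)) ++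
        PySem.List.pyRepeat (PySem.List.slice w (some (p.1 + 1)) none) 2) := by
  rw [PySem.List.foldl_append_if]
  congr 1
  apply List.map_congr_left
  intro xy _
  have hrep : PySem.List.pyRepeat (PySem.List.slice w (some (xy.1 + 1)) none) 2
      = PySem.List.slice w (some (xy.1 + 1)) none ++ PySem.List.slice w (some (xy.1 + 1)) none := by
    simp [PySem.List.pyRepeat]
  rw [hrep, PySem.List.slice_zero_start, List.append_assoc]

theorem generate_eq (word : String) :
    generate word = (PySem.List.sorted
      (pvF word.toList
        ++ (pvAListOf (pvHits ['I','I','I'] word.toList)).map (pvV word.toList ['I','I','I'] ['U'])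
        ++ (pvAListOf (pvHits ['U','U'] word.toList)).map (pvV word.toList ['U','U'] []))
      (fun x => x) false).map String.ofList := by
  simp only [generate]
  rw [pvFront,
    pvABlockG word.toList ['I','I','I'] ['X','X','X'] ['U'] _ (by simp) (by decide) rfl,
    pvABlockG word.toList ['U','U'] ['X','X'] [] _ (by simp) (by decide) rfl]
  simp only [pvF, List.append_assoc]

-- ===== B-side: the single pass emits exactly the greedy non-overlapping hits =====

-- the rule-3/4 positions the single pass emits scanning from index k with skip pointer s
def pvIH (w sub : List Char) : Nat → Nat → List Nat
  | k, s =>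
    if h : k < w.length then
      if s ≤ k ∧ sub.isPrefixOf (w.drop k) = true then
        k :: pvIH w sub (k + 1) (k + sub.length)
      else pvIH w sub (k + 1) s
    else []
termination_by k _ => w.length - k

theorem pvIH_stop (w sub : List Char) (k s : Nat) (h : ¬ k < w.length) :
    pvIH w sub k s = [] := by
  rw [pvIH, dif_neg h]

theorem pvIH_step (w sub : List Char) (k s : Nat) (h : k < w.length) :
    pvIH w sub k s =
      if s ≤ k ∧ sub.isPrefixOf (w.drop k) = true then
        k :: pvIH w sub (k + 1) (k + sub.length)
      else pvIH w sub (k + 1) s := by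
  rw [pvIH, dif_pos h]

theorem pvIH_eq (w sub : List Char) (hs : sub ≠ []) :
    ∀ (m k s : Nat), w.length - k = m →
      pvIH w sub k s = (pvHits sub (w.drop (max k s))).map (· + max k s) := by
  have hsl : 1 ≤ sub.length := by
    cases sub with
    | nil => exact absurd rfl hs
    | cons a b => simp
  intro m
  induction m with
  | zero =>
    intro k s hm
    have hk : ¬ k < w.length := by omega
    rw [pvIH_stop w sub k s hk]
    have hd : w.drop (max k s) = [] := List.drop_eq_nil_of_le (by omega)
    rw [hd, pvHits_nil]
    rfl
  | succ m ih =>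
    intro k s hm
    have hk : k < w.length := by omega
    have hdk : w.drop k = w[k] :: w.drop (k + 1) := List.drop_eq_getElem_cons hk
    rw [pvIH_step w sub k s hk]
    split_ifs with hc
    · -- hit at k
      have hmax : max k s = k := by omega
      rw [hmax, ih (k + 1) (k + sub.length) (by omega)]
      have hmax2 : max (k + 1) (k + sub.length) = k + sub.length := by omega
      rw [hmax2, hdk, pvHits_cons, if_pos ⟨by rw [← hdk]; exact hc.2, hs⟩]
      have hdd : (w[k] :: w.drop (k + 1)).drop sub.length = w.drop (k + sub.length) := by
        rw [← hdk, List.drop_drop]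
      rw [hdd]
      simp only [List.map_cons, List.map_map, Nat.zero_add]
      congr 1
      apply List.map_congr_left
      intro x _
      simp
      omega
    · rcases Nat.lt_or_ge k s with hks | hks
      · -- still skipping: no emission regardless of prefix
        have hmax : max k s = s := by omega
        have hmax2 : max (k + 1) s = s := by omega
        rw [ih (k + 1) s (by omega), hmax, hmax2]
      · -- no match at k
        have hnp : ¬ sub.isPrefixOf (w.drop k) = true := fun hp => hc ⟨hks, hp⟩
        have hmax : max k s = k := by omega
        have hmax2 : max (k + 1) s = k + 1 := by omega
        rw [ih (k + 1) s (by omega), hmax, hmax2, hdk, pvHits_cons,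
          if_neg (fun hcc => hnp (by rw [hdk]; exact hcc.1))]
        rw [List.map_map]
        apply List.map_congr_left
        intro x _
        simp
        omega

-- the slice test of the pass is the prefix test
theorem pvCond (w sub : List Char) (k m : Nat) (hm : sub.length = m) :
    (PySem.List.slice w (some ((k : Nat) : Int)) (some (((k : Nat) : Int) + ((m : Nat) : Int)))
      = sub) ↔ sub.isPrefixOf (w.drop k) = true := by
  rw [PySem.List.slice_natCast_add]
  constructor
  · intro h
    rw [List.isPrefixOf_iff_prefix, ← h]
    exact List.take_prefix _ _
  · intro h
    have := List.prefix_iff_eq_take.mp ((List.isPrefixOf_iff_prefix).mp h)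
    rw [hm] at this
    exact this.symm

-- one pass over the tail of the enumeration = M-variants ++ rule-3 hits ++ rule-4 hits, up to order
theorem pvFoldB (w : List Char) :
    ∀ (t : List Char) (k : Nat), w.drop k = t → ∀ (s3 s2 : Nat) (acc : List (List Char)),
      ∃ l : List (List Char),
        ((PySem.List.enumerate t ((k : Nat) : Int)).foldl (pvStepB w)
            (acc, ((s3 : Nat) : Int), ((s2 : Nat) : Int))).1 = acc ++ l ∧
        l.Perm
          (((PySem.List.enumerate t ((k : Nat) : Int)).filter (fun p => p.2 == 'M')).map (fun p =>
              PySem.List.slice w none (some (p.1 + 1)) ++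
                PySem.List.pyRepeat (PySem.List.slice w (some (p.1 + 1)) none) 2)
            ++ (pvIH w ['I','I','I'] k s3).map (pvV w ['I','I','I'] ['U'])
            ++ (pvIH w ['U','U'] k s2).map (pvV w ['U','U'] [])) := by
  intro t
  induction t with
  | nil =>
    intro k hk s3 s2 acc
    have hkn : ¬ k < w.length := by
      have := List.drop_eq_nil_iff.mp hk
      omega
    refine ⟨[], by simp [PySem.List.enumerate_nil], ?_⟩
    rw [pvIH_stop w _ k s3 hkn, pvIH_stop w _ k s2 hkn]
    simp [PySem.List.enumerate_nil]
  | cons c t ih =>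
    intro k hk s3 s2 acc
    have hkn : k < w.length := by
      by_contra hkk
      rw [List.drop_eq_nil_of_le (by omega)] at hk
      exact absurd hk.symm (by simp)
    have hk' : w.drop (k + 1) = t := by
      have : (w.drop k).tail = t := by rw [hk]; rfl
      rw [← this, List.tail_drop]
    rw [PySem.List.enumerate_cons, List.foldl_cons]
    have hcast : ((k : Nat) : Int) + 1 = (((k + 1 : Nat)) : Int) := by push_cast; ring
    have hcond3 : (((s3 : Nat) : Int) ≤ ((k : Nat) : Int) ∧
        PySem.List.slice w (some ((k : Nat) : Int)) (some (((k : Nat) : Int) + 3))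
          = ['I','I','I'])
        ↔ (s3 ≤ k ∧ (['I','I','I'] : List Char).isPrefixOf (w.drop k) = true) := by
      rw [show (((k : Nat) : Int) + 3) = (((k : Nat) : Int) + ((3 : Nat) : Int)) by norm_num,
        pvCond w ['I','I','I'] k 3 rfl, Nat.cast_le]
    have hcond2 : (((s2 : Nat) : Int) ≤ ((k : Nat) : Int) ∧
        PySem.List.slice w (some ((k : Nat) : Int)) (some (((k : Nat) : Int) + 2))
          = ['U','U'])
        ↔ (s2 ≤ k ∧ (['U','U'] : List Char).isPrefixOf (w.drop k) = true) := by
      rw [show (((k : Nat) : Int) + 2) = (((k : Nat) : Int) + ((2 : Nat) : Int)) by norm_num,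
        pvCond w ['U','U'] k 2 rfl, Nat.cast_le]
    -- the emission of the 'M' rule at index k
    set eM : List (List Char) := if c == 'M' then
        [PySem.List.slice w none (some (((k : Nat) : Int) + 1)) ++
          PySem.List.pyRepeat (PySem.List.slice w (some (((k : Nat) : Int) + 1)) none) 2]
      else [] with heM
    have hMsplit : ((((k : Nat) : Int), c) :: PySem.List.enumerate t (((k + 1 : Nat)) : Int)
          |>.filter (fun p => p.2 == 'M')).map (fun p =>
            PySem.List.slice w none (some (p.1 + 1)) ++
              PySem.List.pyRepeat (PySem.List.slice w (some (p.1 + 1)) none) 2)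
        = eM ++ ((PySem.List.enumerate t (((k + 1 : Nat)) : Int)).filter
            (fun p => p.2 == 'M')).map (fun p =>
              PySem.List.slice w none (some (p.1 + 1)) ++
                PySem.List.pyRepeat (PySem.List.slice w (some (p.1 + 1)) none) 2) := by
      rw [List.filter_cons]
      by_cases hM : c == 'M' <;> simp [hM, heM]
    by_cases h3 : s3 ≤ k ∧ (['I','I','I'] : List Char).isPrefixOf (w.drop k) = true
    all_goals by_cases h2 : s2 ≤ k ∧ (['U','U'] : List Char).isPrefixOf (w.drop k) = true
    · -- both rule 3 and rule 4 fire at k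
      have hstep : pvStepB w (acc, ((s3 : Nat) : Int), ((s2 : Nat) : Int)) (((k : Nat) : Int), c)
          = (acc ++ eM ++ [pvV w ['I','I','I'] ['U'] k] ++ [pvV w ['U','U'] [] k],
             (((k + 3 : Nat)) : Int), (((k + 2 : Nat)) : Int)) := by
        simp only [pvStepB, heM]
        rw [if_pos (hcond3.mpr h3), if_pos (hcond2.mpr h2)]
        have e3 := pvElemB w ['I','I','I'] ['U'] k
        have e2 := pvElemB w ['U','U'] [] k
        simp only [show ((k : Int) + 3) = ((k + 3 : Nat) : Int) by push_cast; ring,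
          show ((k : Int) + 2) = ((k + 2 : Nat) : Int) by push_cast; ring] at *
        by_cases hM : c == 'M' <;>
          simp [hM, ← e3, ← e2, List.append_assoc]
      rw [hstep, hcast]
      obtain ⟨l', hl', hp'⟩ := ih (k + 1) hk' (k + 3) (k + 2)
        (acc ++ eM ++ [pvV w ['I','I','I'] ['U'] k] ++ [pvV w ['U','U'] [] k])
      refine ⟨eM ++ [pvV w ['I','I','I'] ['U'] k] ++ [pvV w ['U','U'] [] k] ++ l', by
        rw [hl']; simp [List.append_assoc], ?_⟩
      have hH3 : pvIH w ['I','I','I'] k s3 = k :: pvIH w ['I','I','I'] (k + 1) (k + 3) := by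
        rw [pvIH_step w ['I','I','I'] k s3 hkn, if_pos h3]
        rfl
      have hH4 : pvIH w ['U','U'] k s2 = k :: pvIH w ['U','U'] (k + 1) (k + 2) := by
        rw [pvIH_step w ['U','U'] k s2 hkn, if_pos h2]
        rfl
      rw [hMsplit, hH3, hH4, List.perm_iff_count]
      intro x
      have hc' := hp'.count_eq x
      simp only [List.count_append, List.map_cons, List.count_cons, List.count_nil] at hc' ⊢
      omega
    · -- only rule 3 fires at k
      have hstep : pvStepB w (acc, ((s3 : Nat) : Int), ((s2 : Nat) : Int)) (((k : Nat) : Int), c)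
          = (acc ++ eM ++ [pvV w ['I','I','I'] ['U'] k],
             (((k + 3 : Nat)) : Int), ((s2 : Nat) : Int)) := by
        simp only [pvStepB, heM]
        rw [if_pos (hcond3.mpr h3), if_neg (fun hcc => h2 (hcond2.mp hcc))]
        have e3 := pvElemB w ['I','I','I'] ['U'] k
        simp only [show ((k : Int) + 3) = ((k + 3 : Nat) : Int) by push_cast; ring] at *
        by_cases hM : c == 'M' <;> simp [hM, ← e3, List.append_assoc]
      rw [hstep, hcast]
      obtain ⟨l', hl', hp'⟩ := ih (k + 1) hk' (k + 3) s2
        (acc ++ eM ++ [pvV w ['I','I','I'] ['U'] k])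
      refine ⟨eM ++ [pvV w ['I','I','I'] ['U'] k] ++ l', by
        rw [hl']; simp [List.append_assoc], ?_⟩
      have hH3 : pvIH w ['I','I','I'] k s3 = k :: pvIH w ['I','I','I'] (k + 1) (k + 3) := by
        rw [pvIH_step w ['I','I','I'] k s3 hkn, if_pos h3]
        rfl
      have hH4 : pvIH w ['U','U'] k s2 = pvIH w ['U','U'] (k + 1) s2 := by
        rw [pvIH_step w ['U','U'] k s2 hkn, if_neg h2]
      rw [hMsplit, hH3, hH4, List.perm_iff_count]
      intro x
      have hc' := hp'.count_eq x
      simp only [List.count_append, List.map_cons, List.count_cons, List.count_nil] at hc' ⊢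
      omega
    · -- only rule 4 fires at k
      have hstep : pvStepB w (acc, ((s3 : Nat) : Int), ((s2 : Nat) : Int)) (((k : Nat) : Int), c)
          = (acc ++ eM ++ [pvV w ['U','U'] [] k],
             ((s3 : Nat) : Int), (((k + 2 : Nat)) : Int)) := by
        simp only [pvStepB, heM]
        rw [if_neg (fun hcc => h3 (hcond3.mp hcc)), if_pos (hcond2.mpr h2)]
        have e2 := pvElemB w ['U','U'] [] k
        simp only [show ((k : Int) + 2) = ((k + 2 : Nat) : Int) by push_cast; ring] at *
        by_cases hM : c == 'M' <;> simp [hM, ← e2, List.append_assoc]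
      rw [hstep, hcast]
      obtain ⟨l', hl', hp'⟩ := ih (k + 1) hk' s3 (k + 2)
        (acc ++ eM ++ [pvV w ['U','U'] [] k])
      refine ⟨eM ++ [pvV w ['U','U'] [] k] ++ l', by
        rw [hl']; simp [List.append_assoc], ?_⟩
      have hH3 : pvIH w ['I','I','I'] k s3 = pvIH w ['I','I','I'] (k + 1) s3 := by
        rw [pvIH_step w ['I','I','I'] k s3 hkn, if_neg h3]
      have hH4 : pvIH w ['U','U'] k s2 = k :: pvIH w ['U','U'] (k + 1) (k + 2) := by
        rw [pvIH_step w ['U','U'] k s2 hkn, if_pos h2]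
        rfl
      rw [hMsplit, hH3, hH4, List.perm_iff_count]
      intro x
      have hc' := hp'.count_eq x
      simp only [List.count_append, List.map_cons, List.count_cons, List.count_nil] at hc' ⊢
      omega
    · -- neither occurrence rule fires at k
      have hstep : pvStepB w (acc, ((s3 : Nat) : Int), ((s2 : Nat) : Int)) (((k : Nat) : Int), c)
          = (acc ++ eM, ((s3 : Nat) : Int), ((s2 : Nat) : Int)) := by
        simp only [pvStepB, heM]
        rw [if_neg (fun hcc => h3 (hcond3.mp hcc)), if_neg (fun hcc => h2 (hcond2.mp hcc))]
        by_cases hM : c == 'M' <;> simp [hM]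
      rw [hstep, hcast]
      obtain ⟨l', hl', hp'⟩ := ih (k + 1) hk' s3 s2 (acc ++ eM)
      refine ⟨eM ++ l', by rw [hl']; simp [List.append_assoc], ?_⟩
      have hH3 : pvIH w ['I','I','I'] k s3 = pvIH w ['I','I','I'] (k + 1) s3 := by
        rw [pvIH_step w ['I','I','I'] k s3 hkn, if_neg h3]
      have hH4 : pvIH w ['U','U'] k s2 = pvIH w ['U','U'] (k + 1) s2 := by
        rw [pvIH_step w ['U','U'] k s2 hkn, if_neg h2]
      rw [hMsplit, hH3, hH4, List.perm_iff_count]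
      intro x
      have hc' := hp'.count_eq x
      simp only [List.count_append, List.map_cons, List.count_cons, List.count_nil] at hc' ⊢
      omega

theorem pvSortedPermMap (xs ys : List (List Char)) (h : xs.Perm ys) :
    (PySem.List.sorted xs (fun x => x) false).map String.ofList
      = (PySem.List.sorted ys (fun x => x) false).map String.ofList := by
  have h2 := (PySem.List.sorted_id_eq_sorted_id_iff_perm xs ys).mpr h
  convert congrArg (List.map String.ofList) h2 using 3

-- ===== value-level lemmas for the degenerate all-'U'-run case =====

theorem pvV_length (w sub mid : List Char) (p : Nat) (hp : p + sub.length ≤ w.length) :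
    (pvV w sub mid p).length = w.length + mid.length - sub.length := by
  simp [pvV, List.length_take, List.length_drop]
  omega

theorem pvVUUGet (s : List Char) (p : Nat) (hp : p + 2 ≤ s.length) (j : Nat)
    (hj : j < s.length - 2) :
    (pvV s ['U','U'] [] p)[j]'(by
        rw [pvV_length s ['U','U'] [] p (by simpa using hp)]; simpa using hj) =
      if j < p then s[j]'(by omega) else s[j + 2]'(by omega) := by
  have hTp : (List.take p s).length = p := by simp [List.length_take]; omega
  rcases Nat.lt_or_ge j p with h1 | h1
  · rw [if_pos h1]
    simp only [pvV, List.append_nil, List.nil_append]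
    rw [List.getElem_append_left (by rw [hTp]; omega)]
    simp [List.getElem_take]
  · rw [if_neg (by omega)]
    simp only [pvV, List.append_nil, List.nil_append]
    rw [List.getElem_append_right (by rw [hTp]; omega), List.getElem_drop]
    rw [pvGetIdx s _ (j + 2) (by rw [hTp]; simp; omega)]

theorem pvUUeq (s : List Char) (q r : Nat) (hqr : q ≤ r) (hr2 : r + 2 ≤ s.length)
    (hall : ∀ i (h1 : q ≤ i) (h2 : i < r + 2), s[i]'(by omega) = 'U') :
    pvV s ['U','U'] [] q = pvV s ['U','U'] [] r := by
  have hq2 : q + 2 ≤ s.length := by omega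
  apply List.ext_getElem
  · rw [pvV_length s ['U','U'] [] q (by simpa using hq2),
      pvV_length s ['U','U'] [] r (by simpa using hr2)]
  · intro j hj1 hj2
    have hjlen : j < s.length - 2 := by
      rw [pvV_length s ['U','U'] [] q (by simpa using hq2)] at hj1
      simp at hj1
      omega
    rw [pvVUUGet s q hq2 j hjlen, pvVUUGet s r hr2 j hjlen]
    split_ifs with ha hb hb
    · rfl
    · omega
    · rw [hall (j + 2) (by omega) (by omega), hall j (by omega) (by omega)]
    · rfl

theorem pvDegPointwise (s : List Char) (q m : Nat) (hm : 0 < m)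
    (h : (s.drop q).take m = List.replicate m 'U') :
    q + m ≤ s.length ∧ ∀ i, q ≤ i → i < q + m → ∀ (hi : i < s.length), s[i] = 'U' := by
  have hlen : ((s.drop q).take m).length = m := by rw [h]; simp
  simp only [List.length_take, List.length_drop] at hlen
  have hqm : q + m ≤ s.length := by omega
  refine ⟨hqm, ?_⟩
  intro i hi1 hi2 hi
  have e1 : ((s.drop q).take m)[i - q]'(by rw [h, List.length_replicate]; omega) = 'U' := by
    simp only [h, List.getElem_replicate]
  simp only [List.getElem_take, List.getElem_drop] at e1
  rw [pvGetIdx s i (q + (i - q)) (by omega) hi]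
  exact e1

theorem pvHits_block (n : Nat) : ∀ (s : List Char) (q : Nat) (t : List Nat), s.length = n →
    pvHits ['U','U'] s = q :: t →
    (s.drop q).take (2 * (t.length + 1)) = List.replicate (2 * (t.length + 1)) 'U' →
    ∀ r ∈ q :: t, r + 2 ≤ q + 2 * (t.length + 1) := by
  induction n using Nat.strong_induction_on with
  | _ n ih =>
    intro s q t hn hh hdeg r hr
    rcases List.mem_cons.mp hr with rfl | hrt
    · omega
    · obtain ⟨h1, h2, h3⟩ := pvHits_spec ['U','U'] s q t hh
      have hsub2 : (['U','U'] : List Char).length = 2 := rfl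
      rw [hsub2] at h2 h3
      cases hht : pvHits ['U','U'] (s.drop (q + 2)) with
      | nil =>
        rw [hht] at h3
        simp only [List.map_nil] at h3
        rw [h3] at hrt
        simp at hrt
      | cons q0 t0 =>
        rw [hht] at h3
        have htl : t.length = t0.length + 1 := by rw [h3]; simp
        obtain ⟨hqm, hpt⟩ := pvDegPointwise s q (2 * (t.length + 1)) (by omega) hdeg
        have hq0 : q0 = 0 := by
          by_contra h0
          have hpre0 : (['U','U'] : List Char).isPrefixOf ((s.drop (q + 2)).drop 0) = true := by
            simp only [List.drop_zero]
            refine pvPrefixOfPointwise ['U','U'] _ 0 ?_ ?_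
            · simp only [List.length_drop, hsub2]
              omega
            · intro j hj hjL
              have hj2 : j < 2 := by simpa using hj
              rw [List.getElem_drop]
              have hval : s[q + 2 + (0 + j)]'(by simp only [List.length_drop] at hjL; omega) = 'U' :=
                hpt (q + 2 + (0 + j)) (by omega) (by omega)
                  (by simp only [List.length_drop] at hjL; omega)
              rw [hval]
              interval_cases j <;> rfl
          exact absurd hpre0 (pvHits_min ['U','U'] (by simp) _ q0 t0 hht 0 (by omega))
        subst hq0
        have hdeg' : ((s.drop (q + 2)).drop 0).take (2 * (t0.length + 1))
            = List.replicate (2 * (t0.length + 1)) 'U' := by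
          simp only [List.drop_zero]
          have e1 : s.drop (q + 2) = (s.drop q).drop 2 := by
            rw [List.drop_drop]
          have e2 : ((s.drop q).drop 2).take (2 * (t0.length + 1))
              = ((s.drop q).take (2 * (t.length + 1))).drop 2 := by
            rw [List.drop_take]
            congr 1
            omega
          rw [e1, e2, hdeg, List.drop_replicate]
          congr 1
          omega
        have hres := ih (s.drop (q + 2)).length (by simp only [List.length_drop]; omega)
          _ 0 t0 rfl hht hdeg'
        rw [h3] at hrt
        obtain ⟨x, hx, rfl⟩ := List.mem_map.mp hrt
        have := hres x hx
        omega

theorem pvDegEq (w : List Char) (q1 : Nat) (t : List Nat)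
    (hh : pvHits ['U','U'] w = q1 :: t)
    (hdeg : (w.drop q1).take (2 * (t.length + 1)) = List.replicate (2 * (t.length + 1)) 'U') :
    ∀ r ∈ q1 :: t, pvV w ['U','U'] [] r = pvV w ['U','U'] [] q1 := by
  obtain ⟨hqm, hpt⟩ := pvDegPointwise w q1 (2 * (t.length + 1)) (by omega) hdeg
  intro r hr
  have hrb := pvHits_block w.length w q1 t rfl hh hdeg r hr
  have hq1r : q1 ≤ r := by
    rcases List.mem_cons.mp hr with rfl | hrt
    · omega
    · have := pvHits_chain ['U','U'] w q1 t hh r hrt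
      simp at this
      omega
  exact (pvUUeq w q1 r hq1r (by omega)
    (fun i h1 h2 => hpt i h1 (by omega) (by omega))).symm

-- ===== lemmas for the tightness theorem (A ≠ B everywhere inside D_generate) =====

theorem map_pvAlt {α β : Type} (f : α → β) (x y : α) :
    ∀ n, (pvAlt x y n).map f = pvAlt (f x) (f y) n := by
  intro n
  induction n generalizing x y with
  | zero => rfl
  | succ n ih => simp [pvAlt, ih]

theorem count_pvAlt {α : Type} [BEq α] [LawfulBEq α] (x y : α) (hxy : x ≠ y) :
    ∀ n, (pvAlt x y n).count x = (n + 1) / 2 ∧ (pvAlt y x n).count x = n / 2 := by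
  intro n
  induction n with
  | zero => simp [pvAlt]
  | succ n ih =>
    constructor
    · show ((x :: pvAlt y x n).count x) = (n + 1 + 1) / 2
      rw [List.count_cons_self, ih.2]
      omega
    · show ((y :: pvAlt x y n).count x) = (n + 1) / 2
      rw [List.count_cons_of_ne (Ne.symm hxy), ih.1]

theorem pvHits_span (sub : List Char) (hs : sub ≠ []) :
    ∀ (n : Nat) (s : List Char), s.length = n → ∀ (q : Nat) (t : List Nat),
      pvHits sub s = q :: t → ∃ r ∈ q :: t, q + sub.length * t.length ≤ r := by
  have hsl : 1 ≤ sub.length := by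
    cases sub with
    | nil => exact absurd rfl hs
    | cons a b => simp
  intro n
  induction n using Nat.strong_induction_on with
  | _ n ih =>
    intro s hn q t hh
    obtain ⟨h1, h2, h3⟩ := pvHits_spec sub s q t hh
    cases hht : pvHits sub (s.drop (q + sub.length)) with
    | nil =>
      rw [hht] at h3
      simp only [List.map_nil] at h3
      exact ⟨q, by simp, by rw [h3]; simp⟩
    | cons q' t' =>
      obtain ⟨r', hr', hb⟩ := ih (s.drop (q + sub.length)).length
        (by simp only [List.length_drop]; omega) _ rfl q' t' hht
      refine ⟨r' + (q + sub.length), ?_, ?_⟩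
      · apply List.mem_cons_of_mem
        rw [h3, hht]
        exact List.mem_map.mpr ⟨r', hr', rfl⟩
      · have htl : t.length = t'.length + 1 := by rw [h3, hht]; simp
        have hb2 : sub.length * t'.length ≤ r' := le_trans (Nat.le_add_left _ _) hb
        rw [htl, Nat.mul_succ]
        set m := sub.length * t'.length
        omega

-- the greedy hits are ≥ sub.length apart (in particular strictly increasing)
theorem pvHits_pairwise (sub : List Char) : ∀ (n : Nat) (s : List Char), s.length = n →
    (pvHits sub s).Pairwise (fun a b => a + sub.length ≤ b) := by
  intro n
  induction n using Nat.strong_induction_on with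
  | _ n ih =>
    intro s hn
    cases s with
    | nil => rw [pvHits_nil]; exact List.Pairwise.nil
    | cons c t =>
      rw [pvHits_cons]
      split_ifs with hc
      · have hsl : 1 ≤ sub.length := by
          cases sub with
          | nil => exact absurd rfl hc.2
          | cons a b => simp
        simp only [List.length_cons] at hn
        have hrec := ih ((c :: t).drop sub.length).length
          (by simp only [List.length_drop, List.length_cons]; omega) _ rfl
        refine List.Pairwise.cons ?_ ?_
        · intro b hb
          obtain ⟨x, -, rfl⟩ := List.mem_map.mp hb
          omega
        · exact (List.pairwise_map).mpr (hrec.imp (by intro a b hab; omega))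
      · have hrec := ih t.length (by simp at hn; omega) t rfl
        exact (List.pairwise_map).mpr (hrec.imp (by intro a b hab; omega))

theorem pvPointwiseDeg (s : List Char) (q m : Nat) (hqm : q + m ≤ s.length)
    (h : ∀ i, q ≤ i → i < q + m → ∀ (hi : i < s.length), s[i] = 'U') :
    (s.drop q).take m = List.replicate m 'U' := by
  apply List.ext_getElem
  · simp [List.length_take, List.length_drop]; omega
  · intro j hj1 hj2
    rw [List.getElem_take, List.getElem_drop, List.getElem_replicate]
    have hjm : j < m := by simpa using hj2
    exact h (q + j) (by omega) (by omega) (by omega)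

theorem pvVIIIGet (s : List Char) (p : Nat) (hp : p + 3 ≤ s.length) (j : Nat)
    (hj : j < s.length - 2) :
    (pvV s ['I','I','I'] ['U'] p)[j]'(by
        rw [pvV_length s ['I','I','I'] ['U'] p (by simpa using hp)]; simpa using hj) =
      if j < p then s[j]'(by omega) else if j = p then 'U' else s[j + 2]'(by omega) := by
  have hTp : (List.take p s).length = p := by simp [List.length_take]; omega
  have hTU : (List.take p s ++ ['U']).length = p + 1 := by simp [hTp]
  rcases Nat.lt_or_ge j p with h1 | h1
  · rw [if_pos h1]
    simp only [pvV]
    rw [List.getElem_append_left (by rw [hTU]; omega),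
      List.getElem_append_left (by rw [hTp]; omega)]
    simp [List.getElem_take]
  · rcases Nat.eq_or_lt_of_le h1 with rfl | h2
    · rw [if_neg (by omega), if_pos rfl]
      simp only [pvV]
      rw [List.getElem_append_left (by rw [hTU]; omega),
        List.getElem_append_right (by simp [hTp])]
      simp [hTp]
    · rw [if_neg (by omega), if_neg (by omega)]
      simp only [pvV]
      rw [List.getElem_append_right (by rw [hTU]; omega), List.getElem_drop]
      congr 1
      rw [hTU]
      show p + 3 + (j - (p + 1)) = j + 2
      omega

-- two distinct rule-3 variants at distinct "III" hits are distinct strings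
theorem pvV3_ne (w : List Char) (p p' : Nat) (hlt : p < p')
    (hp : (['I','I','I'] : List Char).isPrefixOf (w.drop p) = true) (hpl : p + 3 ≤ w.length)
    (hpl' : p' + 3 ≤ w.length) :
    pvV w ['I','I','I'] ['U'] p ≠ pvV w ['I','I','I'] ['U'] p' := by
  intro h
  have hjp : p < w.length - 2 := by omega
  have h1 := List.getElem_of_eq h (i := p)
    (by rw [pvV_length w ['I','I','I'] ['U'] p (by simpa using hpl)]; simpa using hjp)
  rw [pvVIIIGet w p hpl p hjp, if_neg (by omega), if_pos rfl,
    pvVIIIGet w p' hpl' p hjp, if_pos hlt] at h1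
  have h2 : w[p]'(by omega) = 'I' := by
    have := pvPrefixGet ['I','I','I'] w p hp (by simpa using hpl) 0 (by simp)
    simpa using this
  rw [h2] at h1
  exact absurd h1 (by decide)

-- a rule-3 variant at an "III" hit never equals a rule-4 variant at a "UU" hit
theorem pvV34_ne (w : List Char) (p q : Nat)
    (hp : (['I','I','I'] : List Char).isPrefixOf (w.drop p) = true) (hpl : p + 3 ≤ w.length)
    (hq : (['U','U'] : List Char).isPrefixOf (w.drop q) = true) (hql : q + 2 ≤ w.length) :
    pvV w ['I','I','I'] ['U'] p ≠ pvV w ['U','U'] [] q := by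
  intro h
  have hjp : p < w.length - 2 := by omega
  have h1 := List.getElem_of_eq h (i := p)
    (by rw [pvV_length w ['I','I','I'] ['U'] p (by simpa using hpl)]; simpa using hjp)
  rw [pvVIIIGet w p hpl p hjp, if_neg (by omega), if_pos rfl,
    pvVUUGet w q hql p hjp] at h1
  rcases Nat.lt_or_ge p q with hpq | hpq
  · rw [if_pos hpq] at h1
    have h2 : w[p]'(by omega) = 'I' := by
      have := pvPrefixGet ['I','I','I'] w p hp (by simpa using hpl) 0 (by simp)
      simpa using this
    rw [h2] at h1
    exact absurd h1 (by decide)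
  · rw [if_neg (by omega)] at h1
    have h2 : w[p + 2]'(by omega) = 'I' := by
      have := pvPrefixGet ['I','I','I'] w p hp (by simpa using hpl) 2 (by simp)
      simpa using this
    rw [h2] at h1
    exact absurd h1 (by decide)

-- equal rule-4 variants at "UU" hits q ≤ q' force a solid run of 'U' on [q, q'+2)
theorem pvUUeq_rev (w : List Char) (q q' : Nat) (hle : q ≤ q')
    (hq : (['U','U'] : List Char).isPrefixOf (w.drop q) = true) (hql : q + 2 ≤ w.length)
    (hql' : q' + 2 ≤ w.length)
    (h : pvV w ['U','U'] [] q = pvV w ['U','U'] [] q') :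
    ∀ i, q ≤ i → i < q' + 2 → ∀ (hi : i < w.length), w[i] = 'U' := by
  have hper : ∀ (j : Nat) (hj1 : q ≤ j) (hj2 : j < q'), w[j]'(by omega) = w[j + 2]'(by omega) := by
    intro j hj1 hj2
    have hjl : j < w.length - 2 := by omega
    have h1 := List.getElem_of_eq h (i := j)
      (by rw [pvV_length w ['U','U'] [] q (by simpa using hql)]; simpa using hjl)
    rw [pvVUUGet w q hql j hjl, if_neg (by omega),
      pvVUUGet w q' hql' j hjl, if_pos hj2] at h1
    exact h1.symm
  have hU0 : w[q]'(by omega) = 'U' := by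
    have := pvPrefixGet ['U','U'] w q hq (by simpa using hql) 0 (by simp)
    simpa using this
  have hU1 : w[q + 1]'(by omega) = 'U' := by
    have := pvPrefixGet ['U','U'] w q hq (by simpa using hql) 1 (by simp)
    simpa using this
  have key : ∀ d, q + d < q' + 2 → ∀ (hd : q + d < w.length), w[q + d] = 'U' := by
    intro d
    induction d using Nat.strong_induction_on with
    | _ d ihd =>
      intro hdb hd
      match d with
      | 0 => exact hU0
      | 1 => exact hU1
      | e + 2 =>
        have he := ihd e (by omega) (by omega) (by omega)
        have hper' := hper (q + e) (by omega) (by omega)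
        rw [pvGetIdx w (q + (e + 2)) (q + e + 2) (by omega) hd, ← hper']
        exact he
  intro i hi1 hi2 hi
  have hkey := key (i - q) (by omega) (by omega)
  rw [pvGetIdx w i (q + (i - q)) (by omega) hi]
  exact hkey

-- A's sorted output equal to B's forces the underlying variant multisets to agree
theorem pvSortedPermInv (xs ys : List (List Char))
    (h : (PySem.List.sorted xs (fun x => x) false).map String.ofList
      = (PySem.List.sorted ys (fun x => x) false).map String.ofList) : xs.Perm ys := by
  have hinj : Function.Injective String.ofList := by
    intro a b hh
    have := congrArg String.toList hh
    simpa using this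
  have h1 := List.map_injective_iff.mpr hinj h
  refine (PySem.List.sorted_id_eq_sorted_id_iff_perm xs ys).mp ?_
  convert h1 using 2

-- ===== VERDICT (by name: the statement is the Claim_ definition above) =====
theorem generate_spec : Claim_unchanged_generate := by
  intro word _ hnD
  show generate word = generate_alt word
  set w := word.toList with hw
  -- B's result, via the single-pass characterisation
  obtain ⟨l, hfold, hperm⟩ := pvFoldB w w 0 (by simp) 0 0
    (if PySem.Chars.endswith w ['I'] then [w ++ ['U']] else [])
  have hB : generate_alt word = (PySem.List.sorted
      ((if PySem.Chars.endswith w ['I'] then [w ++ ['U']] else []) ++ l)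
      (fun x => x) false).map String.ofList := by
    simp only [generate_alt, ← hw]
    simp only [Nat.cast_zero] at hfold
    rw [hfold]
  -- rewrite the hit lists of the pass to the greedy hit lists
  have hIH3 : pvIH w ['I','I','I'] 0 0 = pvHits ['I','I','I'] w := by
    rw [pvIH_eq w ['I','I','I'] (by simp) (w.length - 0) 0 0 rfl]
    simp
  have hIH4 : pvIH w ['U','U'] 0 0 = pvHits ['U','U'] w := by
    rw [pvIH_eq w ['U','U'] (by simp) (w.length - 0) 0 0 rfl]
    simp
  rw [hIH3, hIH4] at hperm
  -- A's result
  have e3 : PySem.Str.count word "III" = PySem.Chars.count w ['I','I','I'] := rfl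
  have e4 : PySem.Str.count word "UU" = PySem.Chars.count w ['U','U'] := rfl
  have hI : (pvHits ['I','I','I'] w).length ≤ 2 := by
    rw [← pvHits_count _ (by simp) _]
    by_contra hgt
    exact hnD (by unfold D_generate; left; rw [e3]; omega)
  have hA4 : (pvAListOf (pvHits ['U','U'] w)).map (pvV w ['U','U'] [])
      = (pvHits ['U','U'] w).map (pvV w ['U','U'] []) := by
    by_cases hU : (pvHits ['U','U'] w).length ≤ 2
    · rw [pvAListOf_short _ hU]
    · -- degenerate all-'U'-run case: every rule-4 variant is the same string
      have hdeg0 : (w.drop (PySem.Str.find word "UU").toNat).take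
            (2 * PySem.Str.count word "UU")
          = List.replicate (2 * PySem.Str.count word "UU") 'U' := by
        by_contra hcon
        refine hnD (by
          unfold D_generate; right
          refine ⟨by rw [e4, pvHits_count _ (by simp) _]; omega, hcon⟩)
      cases hh : pvHits ['U','U'] w with
      | nil => rw [hh] at hU; simp at hU
      | cons q1 t =>
        have hfind : PySem.Chars.find w ['U','U'] = (q1 : Int) :=
          pvHits_find_cons _ (by simp) _ q1 t hh
        have efind : (PySem.Str.find word "UU").toNat = q1 := by
          have : PySem.Str.find word "UU" = PySem.Chars.find w ['U','U'] := rfl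
          rw [this, hfind]
          simp
        have ecount : PySem.Str.count word "UU" = t.length + 1 := by
          rw [e4, pvHits_count _ (by simp) _, hh]
          simp
        rw [efind, ecount] at hdeg0
        have hvals := pvDegEq w q1 t hh hdeg0
        have hmapB : (q1 :: t).map (pvV w ['U','U'] [])
            = List.replicate (q1 :: t).length (pvV w ['U','U'] [] q1) := by
          rw [show (q1 :: t).map (pvV w ['U','U'] [])
              = (q1 :: t).map (fun _ => pvV w ['U','U'] [] q1) from
            List.map_congr_left hvals, List.map_const']
        have hmapA : (pvAListOf (q1 :: t)).map (pvV w ['U','U'] [])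
            = List.replicate (q1 :: t).length (pvV w ['U','U'] [] q1) := by
          rw [show (pvAListOf (q1 :: t)).map (pvV w ['U','U'] [])
              = (pvAListOf (q1 :: t)).map (fun _ => pvV w ['U','U'] [] q1) from
            List.map_congr_left (fun x hx => hvals x (mem_pvAListOf _ x hx)),
            List.map_const', length_pvAListOf]
        rw [hmapA, hmapB]
  rw [generate_eq word, hB, ← hw]
  apply pvSortedPermMap
  rw [pvAListOf_short _ hI, hA4, pvF]
  have hperm2 : ((if PySem.Chars.endswith w ['I'] then [w ++ ['U']] else []) ++ l).Perm
      ((if PySem.Chars.endswith w ['I'] then [w ++ ['U']] else []) ++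
        (((PySem.List.enumerate w 0).filter (fun p => p.2 == 'M')).map (fun p =>
            PySem.List.slice w none (some (p.1 + 1)) ++
              PySem.List.pyRepeat (PySem.List.slice w (some (p.1 + 1)) none) 2)
          ++ (pvHits ['I','I','I'] w).map (pvV w ['I','I','I'] ['U'])
          ++ (pvHits ['U','U'] w).map (pvV w ['U','U'] []))) := by
    apply List.Perm.append_left
    simp only [Nat.cast_zero] at hperm
    exact hperm
  simpa only [List.append_assoc] using hperm2.symm

theorem generate_changed : Claim_changed_generate := by
  unfold Claim_changed_generate; decide

theorem generate_tight : Claim_exact_generate := by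
  intro word _ hD heq
  set w := word.toList with hw
  -- B's result, via the single-pass characterisation
  obtain ⟨l, hfold, hperm⟩ := pvFoldB w w 0 (by simp) 0 0
    (if PySem.Chars.endswith w ['I'] then [w ++ ['U']] else [])
  have hB : generate_alt word = (PySem.List.sorted
      ((if PySem.Chars.endswith w ['I'] then [w ++ ['U']] else []) ++ l)
      (fun x => x) false).map String.ofList := by
    simp only [generate_alt, ← hw]
    simp only [Nat.cast_zero] at hfold
    rw [hfold]
  have hIH3 : pvIH w ['I','I','I'] 0 0 = pvHits ['I','I','I'] w := by
    rw [pvIH_eq w ['I','I','I'] (by simp) (w.length - 0) 0 0 rfl]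
    simp
  have hIH4 : pvIH w ['U','U'] 0 0 = pvHits ['U','U'] w := by
    rw [pvIH_eq w ['U','U'] (by simp) (w.length - 0) 0 0 rfl]
    simp
  rw [hIH3, hIH4] at hperm
  simp only [Nat.cast_zero] at hperm
  rw [generate_eq word, hB, ← hw] at heq
  have hP := (pvSortedPermInv _ _ heq).trans (List.Perm.append_left _ hperm)
  -- the multiset count equation, with the common rule-1/2 front cancelled
  have hcnt : ∀ z : List Char,
      ((pvAListOf (pvHits ['I','I','I'] w)).map (pvV w ['I','I','I'] ['U'])).count z
        + ((pvAListOf (pvHits ['U','U'] w)).map (pvV w ['U','U'] [])).count z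
      = ((pvHits ['I','I','I'] w).map (pvV w ['I','I','I'] ['U'])).count z
        + ((pvHits ['U','U'] w).map (pvV w ['U','U'] [])).count z := by
    intro z
    have hce := hP.count_eq z
    simp only [pvF, List.count_append, List.append_assoc] at hce
    omega
  have hall3 := pvHits_all ['I','I','I'] (by simp) w.length w rfl
  have hall4 := pvHits_all ['U','U'] (by simp) w.length w rfl
  have hpw3 := pvHits_pairwise ['I','I','I'] w.length w rfl
  have hpw4 := pvHits_pairwise ['U','U'] w.length w rfl
  by_cases hc3 : 3 ≤ (pvHits ['I','I','I'] w).length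
  · -- at least three "III" hits: the third hit's variant appears in B's list only
    obtain ⟨p1, p2, p3, r, hh3⟩ :
        ∃ p1 p2 p3 r, pvHits ['I','I','I'] w = p1 :: p2 :: p3 :: r := by
      cases h : pvHits ['I','I','I'] w with
      | nil => rw [h] at hc3; simp at hc3
      | cons a t =>
        cases t with
        | nil => rw [h] at hc3; simp at hc3
        | cons b t2 =>
          cases t2 with
          | nil => rw [h] at hc3; simp at hc3
          | cons cc t3 => exact ⟨a, b, cc, t3, rfl⟩
    rw [hh3] at hpw3
    obtain ⟨hrel1, hpwA⟩ := List.pairwise_cons.mp hpw3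
    obtain ⟨hrel2, hpwB⟩ := List.pairwise_cons.mp hpwA
    obtain ⟨hpre1, hbd1⟩ := hall3 p1 (by rw [hh3]; simp)
    obtain ⟨hpre2, hbd2⟩ := hall3 p2 (by rw [hh3]; simp)
    obtain ⟨hpre3, hbd3⟩ := hall3 p3 (by rw [hh3]; simp)
    have hlen3 : (['I','I','I'] : List Char).length = 3 := rfl
    rw [hlen3] at hbd1 hbd2 hbd3
    -- B's rule-3 block: nodup, so the third variant counts exactly once
    have hnd : ((p1 :: p2 :: p3 :: r).map (pvV w ['I','I','I'] ['U'])).Nodup := by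
      refine (List.pairwise_map).mpr (List.Pairwise.imp_of_mem ?_ hpw3)
      intro a b ha hb hab
      obtain ⟨hpa, hba⟩ := hall3 a (by rw [hh3]; exact ha)
      obtain ⟨hpb, hbb⟩ := hall3 b (by rw [hh3]; exact hb)
      rw [hlen3] at hba hbb
      exact pvV3_ne w a b (by omega) hpa hba hbb
    have hcB3 : ((p1 :: p2 :: p3 :: r).map (pvV w ['I','I','I'] ['U'])).count
        (pvV w ['I','I','I'] ['U'] p3) = 1 :=
      List.count_eq_one_of_mem hnd (List.mem_map.mpr ⟨p3, by simp, rfl⟩)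
    have hcA3 : ((pvAListOf (p1 :: p2 :: p3 :: r)).map (pvV w ['I','I','I'] ['U'])).count
        (pvV w ['I','I','I'] ['U'] p3) = 0 := by
      refine List.count_eq_zero.mpr ?_
      intro hmem
      obtain ⟨x, hx, hfx⟩ := List.mem_map.mp hmem
      have hx2 : x = p1 ∨ x = p2 := mem_pvAlt p1 p2 x _ (by simpa [pvAListOf] using hx)
      have h12 : p1 + 3 ≤ p2 := by simpa using hrel1 p2 (by simp)
      have h23 : p2 + 3 ≤ p3 := by simpa using hrel2 p3 (by simp)
      rcases hx2 with rfl | rfl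
      · exact pvV3_ne w x p3 (by omega) hpre1 hbd1 hbd3 hfx
      · exact pvV3_ne w x p3 (by omega) hpre2 hbd2 hbd3 hfx
    have hne4 : ∀ q ∈ pvHits ['U','U'] w,
        pvV w ['U','U'] [] q ≠ pvV w ['I','I','I'] ['U'] p3 := by
      intro q hq hfq
      obtain ⟨hpq, hbq⟩ := hall4 q hq
      exact pvV34_ne w p3 q hpre3 hbd3 hpq (by simpa using hbq) hfq.symm
    have hcB4 : ((pvHits ['U','U'] w).map (pvV w ['U','U'] [])).count
        (pvV w ['I','I','I'] ['U'] p3) = 0 := by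
      refine List.count_eq_zero.mpr ?_
      intro hmem
      obtain ⟨x, hx, hfx⟩ := List.mem_map.mp hmem
      exact hne4 x hx hfx
    have hcA4 : ((pvAListOf (pvHits ['U','U'] w)).map (pvV w ['U','U'] [])).count
        (pvV w ['I','I','I'] ['U'] p3) = 0 := by
      refine List.count_eq_zero.mpr ?_
      intro hmem
      obtain ⟨x, hx, hfx⟩ := List.mem_map.mp hmem
      exact hne4 x (mem_pvAListOf _ x hx) hfx
    have := hcnt (pvV w ['I','I','I'] ['U'] p3)
    rw [hh3] at this
    rw [hcB3, hcA3, hcB4, hcA4] at this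
    omega
  · -- at most two "III" hits: the difference comes from the "UU" rule
    have hA3eq : pvAListOf (pvHits ['I','I','I'] w) = pvHits ['I','I','I'] w :=
      pvAListOf_short _ (by omega)
    rcases hD with hD3 | ⟨hc2s, hnds⟩
    · -- 3 ≤ count of "III" contradicts hc3
      have : PySem.Str.count word "III" = (pvHits ['I','I','I'] w).length := by
        have e : PySem.Str.count word "III" = PySem.Chars.count w ['I','I','I'] := rfl
        rw [e, pvHits_count _ (by simp) _]
      omega
    · have hc2 : 3 ≤ (pvHits ['U','U'] w).length := by
        have e : PySem.Str.count word "UU" = PySem.Chars.count w ['U','U'] := rfl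
        rw [e, pvHits_count _ (by simp) _] at hc2s
        omega
      obtain ⟨q1, q2, q3, r, hh4⟩ :
          ∃ q1 q2 q3 r, pvHits ['U','U'] w = q1 :: q2 :: q3 :: r := by
        cases h : pvHits ['U','U'] w with
        | nil => rw [h] at hc2; simp at hc2
        | cons a t =>
          cases t with
          | nil => rw [h] at hc2; simp at hc2
          | cons b t2 =>
            cases t2 with
            | nil => rw [h] at hc2; simp at hc2
            | cons cc t3 => exact ⟨a, b, cc, t3, rfl⟩
      rw [hh4] at hpw4
      obtain ⟨hrel1, hpwA⟩ := List.pairwise_cons.mp hpw4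
      obtain ⟨hrel2, hpwB⟩ := List.pairwise_cons.mp hpwA
      obtain ⟨hpre1, hbd1⟩ := hall4 q1 (by rw [hh4]; simp)
      obtain ⟨hpre2, hbd2⟩ := hall4 q2 (by rw [hh4]; simp)
      have hlen2 : (['U','U'] : List Char).length = 2 := rfl
      rw [hlen2] at hbd1 hbd2
      -- translate the non-degeneracy hypothesis to the hit list
      have efind : (PySem.Str.find word "UU").toNat = q1 := by
        have e : PySem.Str.find word "UU" = PySem.Chars.find w ['U','U'] := rfl
        rw [e, pvHits_find_cons _ (by simp) _ q1 (q2 :: q3 :: r) hh4]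
        simp
      have ecount : PySem.Str.count word "UU" = r.length + 3 := by
        have e : PySem.Str.count word "UU" = PySem.Chars.count w ['U','U'] := rfl
        rw [e, pvHits_count _ (by simp) _, hh4]
        simp
      rw [efind, ecount, ← hw] at hnds
      -- the count equation at z = the first "UU" variant reduces to the rule-4 blocks
      have hcnt4 : ∀ z : List Char,
          ((pvAListOf (pvHits ['U','U'] w)).map (pvV w ['U','U'] [])).count z
            = ((pvHits ['U','U'] w).map (pvV w ['U','U'] [])).count z := by
        intro z
        have := hcnt z
        rw [hA3eq] at this
        omega
      by_cases hVq : pvV w ['U','U'] [] q2 = pvV w ['U','U'] [] q1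
      · -- the first two variants coincide: B's whole rule-4 block must be constant → solid run
        have hcA4 : ((pvAListOf (q1 :: q2 :: q3 :: r)).map (pvV w ['U','U'] [])).count
            (pvV w ['U','U'] [] q1) = r.length + 3 := by
          have hlen : ((pvAListOf (q1 :: q2 :: q3 :: r)).map (pvV w ['U','U'] [])).length
              = r.length + 3 := by
            rw [List.length_map, length_pvAListOf]
            simp
          rw [← hlen]
          refine List.count_eq_length.mpr ?_
          intro b hb
          obtain ⟨x, hx, hfx⟩ := List.mem_map.mp hb
          have hx2 : x = q1 ∨ x = q2 := mem_pvAlt q1 q2 x _ (by simpa [pvAListOf] using hx)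
          rcases hx2 with rfl | rfl
          · exact hfx
          · rw [← hfx, hVq]
        have hBlen : ((q1 :: q2 :: q3 :: r).map (pvV w ['U','U'] [])).length = r.length + 3 := by
          simp
        have hcB4 := hcnt4 (pvV w ['U','U'] [] q1)
        rw [hh4, hcA4] at hcB4
        have hallv : ∀ b ∈ (q1 :: q2 :: q3 :: r).map (pvV w ['U','U'] []),
            pvV w ['U','U'] [] q1 = b :=
          List.count_eq_length.mp (by rw [hBlen, ← hcB4])
        -- every hit's variant equals the first one; the span hit forces a solid 'U' run
        obtain ⟨rr, hrr, hrb⟩ := pvHits_span ['U','U'] (by simp) w.length w rfl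
          q1 (q2 :: q3 :: r) hh4
        rw [hh4] at hall4
        obtain ⟨hprer, hbdr⟩ := hall4 rr hrr
        rw [hlen2] at hbdr
        have hq1rr : q1 ≤ rr := by
          rcases List.mem_cons.mp hrr with rfl | hrt
          · omega
          · have := hrel1 rr hrt
            omega
        have hrrv : pvV w ['U','U'] [] q1 = pvV w ['U','U'] [] rr :=
          hallv _ (List.mem_map.mpr ⟨rr, hrr, rfl⟩)
        have hsolid := pvUUeq_rev w q1 rr hq1rr hpre1 hbd1 hbdr hrrv
        have hspan : q1 + 2 * (r.length + 3) ≤ rr + 2 := by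
          have : (q2 :: q3 :: r).length = r.length + 2 := by simp
          rw [hlen2] at hrb
          omega
        refine hnds (pvPointwiseDeg w q1 (2 * (r.length + 3)) (by omega) ?_)
        intro i hi1 hi2 hi
        exact hsolid i hi1 (by omega) hi
      · -- the first two variants differ: A repeats the first ⌈c/2⌉ ≥ 2 times, B has it once
        have hne21 : pvV w ['U','U'] [] q1 ≠ pvV w ['U','U'] [] q2 := fun h => hVq h.symm
        have hcA4 : ((pvAListOf (q1 :: q2 :: q3 :: r)).map (pvV w ['U','U'] [])).count
            (pvV w ['U','U'] [] q1) = (r.length + 3 + 1) / 2 := by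
          have e1 : pvAListOf (q1 :: q2 :: q3 :: r) = pvAlt q1 q2 (r.length + 3) := by
            simp [pvAListOf]
          rw [e1, map_pvAlt]
          exact (count_pvAlt _ _ hne21 (r.length + 3)).1
        have hq1q2 : q1 + 2 ≤ q2 := by simpa using hrel1 q2 (by simp)
        have hrest : ∀ x ∈ q3 :: r, pvV w ['U','U'] [] x ≠ pvV w ['U','U'] [] q1 := by
          intro x hx hfx
          obtain ⟨hprex, hbdx⟩ := hall4 x (by
            rw [hh4]; exact List.mem_cons_of_mem _ (List.mem_cons_of_mem _ hx))
          rw [hlen2] at hbdx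
          have hq2x : q2 + 2 ≤ x := by simpa using hrel2 x hx
          have hsolid := pvUUeq_rev w q1 x (by omega) hpre1 hbd1 hbdx hfx.symm
          exact hVq ((pvUUeq w q1 q2 (by omega) hbd2
            (fun i h1 h2 => hsolid i h1 (by omega) (by omega))).symm)
        have hcB4 : ((q1 :: q2 :: q3 :: r).map (pvV w ['U','U'] [])).count
            (pvV w ['U','U'] [] q1) = 1 := by
          have h0 : ((q3 :: r).map (pvV w ['U','U'] [])).count (pvV w ['U','U'] [] q1) = 0 := by
            refine List.count_eq_zero.mpr ?_
            intro hmem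
            obtain ⟨x, hx, hfx⟩ := List.mem_map.mp hmem
            exact hrest x hx hfx
          have hmc : (q1 :: q2 :: q3 :: r).map (pvV w ['U','U'] [])
              = pvV w ['U','U'] [] q1 :: pvV w ['U','U'] [] q2
                :: (q3 :: r).map (pvV w ['U','U'] []) := by simp
          rw [hmc, List.count_cons, List.count_cons, h0]
          simp [hVq]
        have := hcnt4 (pvV w ['U','U'] [] q1)
        rw [hh4, hcA4, hcB4] at this
        omega
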